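-- pv_equiv track=rewrite | github.com/MyungHyun-Git/Individual | PDF_Reader/PDF_Read_Func.py | Get_Columns_Text
-- ===== SOURCE A (Python) =====
-- def Get_Columns_Text(allPages, Intensity_num, Concent_num, Calib_num):
--     Intensity_text = []
--     Concent_text = []
--     Calib_text = []
--
--     for idx, onePage in enumerate(allPages):
--         Intensity_text.append(onePage[Intensity_num[idx]: Concent_num[idx]])
--         Concent_text.append(onePage[Concent_num[idx]: Calib_num[idx]])
--
--         end_space_count = 0
--         for i in range(len(onePage) - 1, -1, -1):
--             if onePage[i].strip() == '':
--                 end_space_count += 1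
--             else:
--                 break
--
--         Calib_text.append(onePage[Calib_num[idx]: -(end_space_count - 1)])
--
--     return Intensity_text, Concent_text, Calib_text
-- ===== SOURCE B (Python) =====
-- def Get_Columns_Text(allPages, Intensity_num, Concent_num, Calib_num):
--     def calib_stop(page):
--         last = -1
--         for i, line in enumerate(page):
--             if line.strip() != '':
--                 last = i
--         end_space_count = len(page) - 1 - last
--         return -(end_space_count - 1)
--
--     triples = list(zip(allPages, Intensity_num, Concent_num, Calib_num))
--     Intensity_text = [p[i:c] for p, i, c, k in triples]
--     Concent_text = [p[c:k] for p, i, c, k in triples]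
--     Calib_text = [p[k:calib_stop(p)] for p, i, c, k in triples]
--     return Intensity_text, Concent_text, Calib_text
-- ===== Notes on version B (the rewrite author's own statement) =====
-- stated objective: alternative
-- what changed: Replaces the single loop with a backward early-break blank scan by a zip of the four lists and three comprehensions, computing the trailing-blank count from the index of the last non-blank line found by a forward pass (default -1).
import Mathlib
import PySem

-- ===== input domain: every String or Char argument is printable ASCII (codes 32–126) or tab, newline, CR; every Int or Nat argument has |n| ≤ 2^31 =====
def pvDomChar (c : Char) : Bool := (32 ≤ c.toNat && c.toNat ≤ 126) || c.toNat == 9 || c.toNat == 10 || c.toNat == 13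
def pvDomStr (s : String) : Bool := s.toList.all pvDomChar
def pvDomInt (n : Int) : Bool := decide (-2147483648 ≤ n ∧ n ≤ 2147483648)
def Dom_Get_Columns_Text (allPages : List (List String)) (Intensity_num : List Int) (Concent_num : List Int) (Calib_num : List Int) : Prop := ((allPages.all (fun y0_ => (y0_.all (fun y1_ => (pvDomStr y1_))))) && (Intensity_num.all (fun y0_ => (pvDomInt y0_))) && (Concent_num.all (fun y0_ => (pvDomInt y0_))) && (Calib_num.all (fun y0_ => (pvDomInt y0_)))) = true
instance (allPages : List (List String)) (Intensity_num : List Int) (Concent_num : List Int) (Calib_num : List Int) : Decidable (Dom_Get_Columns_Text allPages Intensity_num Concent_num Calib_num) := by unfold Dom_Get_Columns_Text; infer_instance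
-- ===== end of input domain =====

-- B replaces A's single loop with a backward early-break blank scan by a zip of the four
-- lists plus three comprehensions, deriving the trailing-blank count from the index of the
-- last non-blank line found by a forward pass (objective: alternative decomposition).

-- ===== PORT A =====
-- Python A's inner backward loop 'for i in range(len(onePage)-1, -1, -1): … else break',
-- transliterated as structural recursion over the reversed page (count until first non-blank).
def pvCountBackA : List String → Int
  | [] => 0
  | s :: rest => if PySem.Str.strip s == "" then 1 + pvCountBackA rest else 0

def Get_Columns_Text (allPages : List (List String)) (Intensity_num : List Int) (Concent_num : List Int) (Calib_num : List Int) : List (List String) × List (List String) × List (List String) :=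
  (PySem.List.enumerate allPages 0).foldl
    (fun st q =>
      let idx := q.1
      let onePage := q.2
      let a1 := st.1 ++ [PySem.List.slice onePage (some (PySem.List.pyGetD Intensity_num idx 0)) (some (PySem.List.pyGetD Concent_num idx 0))]
      let a2 := st.2.1 ++ [PySem.List.slice onePage (some (PySem.List.pyGetD Concent_num idx 0)) (some (PySem.List.pyGetD Calib_num idx 0))]
      let endSpaceCount := pvCountBackA onePage.reverse
      let a3 := st.2.2 ++ [PySem.List.slice onePage (some (PySem.List.pyGetD Calib_num idx 0)) (some (-(endSpaceCount - 1)))]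
      (a1, a2, a3))
    ([], [], [])

-- ===== PORT B =====
-- forward pass: index of the last non-blank line, -1 when none
def pvLastNonblankB (page : List String) : Int :=
  (PySem.List.enumerate page 0).foldl (fun last q => if PySem.Str.strip q.2 != "" then q.1 else last) (-1)

def pvCalibStopB (page : List String) : Int :=
  -(((page.length : Int) - 1 - pvLastNonblankB page) - 1)

def Get_Columns_Text_alt (allPages : List (List String)) (Intensity_num : List Int) (Concent_num : List Int) (Calib_num : List Int) : List (List String) × List (List String) × List (List String) :=
  let triples := allPages.zip (Intensity_num.zip (Concent_num.zip Calib_num))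
  (triples.map (fun t => PySem.List.slice t.1 (some t.2.1) (some t.2.2.1)),
   triples.map (fun t => PySem.List.slice t.1 (some t.2.2.1) (some t.2.2.2)),
   triples.map (fun t => PySem.List.slice t.1 (some t.2.2.2) (some (pvCalibStopB t.1))))

-- ===== PRECONDITION & SPEC =====
-- Python A raises IndexError when one of the three index lists is shorter than allPages.
def Pre_Get_Columns_Text (allPages : List (List String)) (Intensity_num : List Int) (Concent_num : List Int) (Calib_num : List Int) : Prop :=
  allPages.length ≤ Intensity_num.length ∧ allPages.length ≤ Concent_num.length ∧ allPages.length ≤ Calib_num.length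
instance (allPages : List (List String)) (Intensity_num : List Int) (Concent_num : List Int) (Calib_num : List Int) : Decidable (Pre_Get_Columns_Text allPages Intensity_num Concent_num Calib_num) := by unfold Pre_Get_Columns_Text; infer_instance
def pvWitness_Get_Columns_Text : List (List String) × List Int × List Int × List Int :=
  ([["a", " ", ""], [""]], [0, 0], [1, 1], [2, 1])

def Spec_Get_Columns_Text (allPages : List (List String)) (Intensity_num : List Int) (Concent_num : List Int) (Calib_num : List Int) (out : List (List String) × List (List String) × List (List String)) : Prop := out = Get_Columns_Text_alt allPages Intensity_num Concent_num Calib_num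
instance (allPages : List (List String)) (Intensity_num : List Int) (Concent_num : List Int) (Calib_num : List Int) (out : List (List String) × List (List String) × List (List String)) : Decidable (Spec_Get_Columns_Text allPages Intensity_num Concent_num Calib_num out) := by unfold Spec_Get_Columns_Text; infer_instance

-- ===== CLAIM (what is proved, stated in full; the proofs are below) =====
def Claim_equal_Get_Columns_Text : Prop := ∀ (allPages : List (List String)) (Intensity_num : List Int) (Concent_num : List Int) (Calib_num : List Int), Dom_Get_Columns_Text allPages Intensity_num Concent_num Calib_num → Pre_Get_Columns_Text allPages Intensity_num Concent_num Calib_num → Spec_Get_Columns_Text allPages Intensity_num Concent_num Calib_num (Get_Columns_Text allPages Intensity_num Concent_num Calib_num)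

-- ===== LEMMAS AND PROOFS =====

-- A's triple-accumulator fold splits into three maps over the enumerated pages.
theorem pv_tri_fold (l : List (Int × List String)) (f1 f2 f3 : Int × List String → List String)
    (a b c : List (List String)) :
    l.foldl (fun st q => (st.1 ++ [f1 q], st.2.1 ++ [f2 q], st.2.2 ++ [f3 q])) (a, b, c)
      = (a ++ l.map f1, b ++ l.map f2, c ++ l.map f3) := by
  induction l generalizing a b c with
  | nil => simp
  | cons x xs ih => simp [ih]

-- the backward break-count equals length - 1 - (last non-blank index)
theorem pv_count_eq (p : List String) :
    pvCountBackA p.reverse = (p.length : Int) - 1 - pvLastNonblankB p := by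
  induction p using List.reverseRecOn with
  | nil => simp [pvCountBackA, pvLastNonblankB]
  | append_singleton l x ih =>
    unfold pvLastNonblankB at *
    rw [PySem.List.enumerate_append]
    simp only [List.reverse_append, List.reverse_singleton, List.singleton_append,
      pvCountBackA, List.foldl_append, PySem.List.enumerate_cons, PySem.List.enumerate_nil,
      List.foldl_cons, List.foldl_nil, List.length_append, List.length_singleton, bne_iff_ne,
      ne_eq, ite_not]
    simp only [bne_iff_ne, ne_eq, ite_not] at ih
    by_cases hx : PySem.Str.strip x = ""
    · simp [hx, ih]; ring
    · simp [hx]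

-- ===== VERDICT (by name: the statement is the Claim_ definition above) =====
theorem Get_Columns_Text_spec : Claim_equal_Get_Columns_Text := by
  intro allPages I C K _hDom hPre
  obtain ⟨h1, h2, h3⟩ := hPre
  unfold Spec_Get_Columns_Text Get_Columns_Text Get_Columns_Text_alt
  rw [pv_tri_fold]
  simp only [List.nil_append]
  refine Prod.ext ?_ (Prod.ext ?_ ?_) <;>
  · apply List.ext_getElem
    · simp [List.length_zip]; omega
    · intro j hj hj'
      have hja : j < allPages.length := by
        simpa using hj
      simp only [List.getElem_map, PySem.List.getElem_enumerate, List.getElem_zip]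
      simp [PySem.List.pyGetD_eq_getElem, h1, h2, h3, pvCalibStopB, pv_count_eq,
        Nat.lt_of_lt_of_le hja]
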